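-- pv_equiv track=rewrite | github.com/tkell/alles | event_streamer.py | get_start_times
-- ===== SOURCE A (Python) =====
-- def get_start_times(durations, start_offset):
--     starts_and_durations = []
--     for i, duration in enumerate(durations):
--         if i == 0:
--             start_time = 0 + start_offset
--         else:
--             start_time = sum(durations[0:i]) + start_offset
--         starts_and_durations.append((start_time, duration))
--     return starts_and_durations
-- ===== SOURCE B (Python) =====
-- def get_start_times(durations, start_offset):
--     result = []
--     start = start_offset
--     for duration in durations:
--         result.append((start, duration))
--         start += duration
--     return result
-- ===== Notes on version B (the rewrite author's own statement) =====
-- stated objective: faster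
-- what changed: Replaced re-summing the prefix durations[0:i] on every iteration with a single running accumulator carried through one pass.
import Mathlib
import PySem

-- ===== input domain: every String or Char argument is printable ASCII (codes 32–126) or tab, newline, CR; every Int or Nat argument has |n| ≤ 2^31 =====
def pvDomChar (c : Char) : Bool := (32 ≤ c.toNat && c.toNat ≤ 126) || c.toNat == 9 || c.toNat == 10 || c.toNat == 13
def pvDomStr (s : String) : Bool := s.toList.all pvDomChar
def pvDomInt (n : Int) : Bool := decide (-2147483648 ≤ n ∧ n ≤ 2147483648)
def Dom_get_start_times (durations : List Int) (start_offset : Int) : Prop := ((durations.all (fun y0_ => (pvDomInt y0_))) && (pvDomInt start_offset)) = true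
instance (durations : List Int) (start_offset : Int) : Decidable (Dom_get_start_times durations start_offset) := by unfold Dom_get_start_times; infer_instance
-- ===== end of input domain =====

-- B replaces A's per-index re-summation of the prefix durations[0:i] by one running accumulator (one pass).

-- ===== PORT A =====
def get_start_times (durations : List Int) (start_offset : Int) : List (Int × Int) :=
  (PySem.List.enumerate durations 0).foldl
    (fun starts_and_durations p =>
      let start_time : Int :=
        if p.1 = 0 then 0 + start_offset
        else (PySem.List.slice durations (some 0) (some p.1)).sum + start_offset
      starts_and_durations ++ [(start_time, p.2)]) []

-- ===== PORT B =====
def get_start_times_alt (durations : List Int) (start_offset : Int) : List (Int × Int) :=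
  (durations.foldl
    (fun st duration => (st.1 ++ [(st.2, duration)], st.2 + duration))
    (([] : List (Int × Int)), start_offset)).1

-- ===== PRECONDITION & SPEC =====
def Spec_get_start_times (durations : List Int) (start_offset : Int) (out : List (Int × Int)) : Prop := out = get_start_times_alt durations start_offset
instance (durations : List Int) (start_offset : Int) (out : List (Int × Int)) : Decidable (Spec_get_start_times durations start_offset out) := by unfold Spec_get_start_times; infer_instance

-- ===== CLAIM (what is proved, stated in full; the proofs are below) =====
def Claim_equal_get_start_times : Prop := ∀ (durations : List Int) (start_offset : Int), Dom_get_start_times durations start_offset → Spec_get_start_times durations start_offset (get_start_times durations start_offset)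

-- ===== LEMMAS AND PROOFS =====

-- A's fold appended onto the end: snoc characterisation
theorem portA_snoc (ds : List Int) (d off : Int) :
    get_start_times (ds ++ [d]) off = get_start_times ds off ++ [(ds.sum + off, d)] := by
  unfold get_start_times
  rw [PySem.List.enumerate_append, List.foldl_append]
  have hinner := PySem.List.foldl_congr_mem (l := PySem.List.enumerate ds 0)
    (init := ([] : List (Int × Int)))
    (f := fun starts_and_durations p =>
      let start_time : Int :=
        if p.1 = 0 then 0 + off
        else (PySem.List.slice (ds ++ [d]) (some 0) (some p.1)).sum + off
      starts_and_durations ++ [(start_time, p.2)])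
    (g := fun starts_and_durations p =>
      let start_time : Int :=
        if p.1 = 0 then 0 + off
        else (PySem.List.slice ds (some 0) (some p.1)).sum + off
      starts_and_durations ++ [(start_time, p.2)])
    (by
      intro acc p hp
      rcases (PySem.List.mem_enumerate_iff _ _ _).1 hp with ⟨k, hk, rfl⟩
      simp only [Int.zero_add]
      by_cases h0 : (k : Int) = 0
      · simp [h0]
      · simp only [h0, if_false]
        rw [PySem.List.slice_zero_start, PySem.List.slice_zero_start,
          PySem.List.slice_to_natCast, PySem.List.slice_to_natCast]
        simp [List.take_append_of_le_length (Nat.le_of_lt hk)])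
  rw [hinner]
  simp only [PySem.List.enumerate_cons, PySem.List.enumerate_nil, List.foldl_cons, List.foldl_nil]
  congr 1
  by_cases h0 : (ds.length : Int) = 0
  · have : ds = [] := by
      cases ds with
      | nil => rfl
      | cons a l => exfalso; simp only [List.length_cons] at h0; omega
    subst this; simp
  · have h0' : (0 : Int) + ds.length ≠ 0 := by omega
    simp only [h0', if_false]
    have h1 : (0 : Int) + (ds.length : Int) = ((ds.length : Nat) : Int) := by omega
    rw [PySem.List.slice_zero_start, h1, PySem.List.slice_to_natCast]
    simp

-- B's accumulator (second component of the fold state) is the offset plus the sum so far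
theorem portB_snd (ds : List Int) (st : List (Int × Int) × Int) :
    (ds.foldl (fun st d => (st.1 ++ [(st.2, d)], st.2 + d)) st).2 = st.2 + ds.sum := by
  induction ds generalizing st with
  | nil => simp
  | cons a l ih => simp [ih]; ring

theorem portB_snoc (ds : List Int) (d off : Int) :
    get_start_times_alt (ds ++ [d]) off = get_start_times_alt ds off ++ [(off + ds.sum, d)] := by
  unfold get_start_times_alt
  rw [List.foldl_append]
  simp [portB_snd]

theorem ports_agree (ds : List Int) (off : Int) :
    get_start_times ds off = get_start_times_alt ds off := by
  induction ds using List.reverseRecOn with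
  | nil => rfl
  | append_singleton l d ih =>
      rw [portA_snoc, portB_snoc, ih, Int.add_comm]

-- ===== VERDICT (by name: the statement is the Claim_ definition above) =====
theorem get_start_times_spec : Claim_equal_get_start_times := by
  intro ds off _
  unfold Spec_get_start_times
  exact ports_agree ds off
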